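-- pv_equiv track=rewrite | github.com/cloudylai/SNA_Final | source/features.py | common_spot
-- ===== SOURCE A (Python) =====
-- def common_spot(pair, check_dict, record):
-- 	assert len(pair) == 2
-- 	x, y = pair
-- 	P_x = set([p for p in check_dict[x]])
-- 	P_y = set([p for p in check_dict[y]])
-- 	P_common = P_x & P_y
-- 	score = len(P_common)
-- 	if record != None:
-- 		record[pair] = score
-- 	return score
-- ===== SOURCE B (Python) =====
-- def common_spot(pair, check_dict, record):
--     assert len(pair) == 2
--     x, y = pair
--     xs = sorted(set(check_dict[x]))
--     ys = sorted(set(check_dict[y]))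
--     i = j = 0
--     score = 0
--     while i < len(xs) and j < len(ys):
--         if xs[i] < ys[j]:
--             i += 1
--         elif ys[j] < xs[i]:
--             j += 1
--         else:
--             score += 1
--             i += 1
--             j += 1
--     if record is not None:
--         record[pair] = score
--     return score
-- ===== Notes on version B (the rewrite author's own statement) =====
-- stated objective: alternative
-- what changed: Replaces set intersection with a sort-then-merge two-pointer scan: both users' distinct spot lists are sorted and walked in lockstep, counting equal heads.
import Mathlib
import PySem

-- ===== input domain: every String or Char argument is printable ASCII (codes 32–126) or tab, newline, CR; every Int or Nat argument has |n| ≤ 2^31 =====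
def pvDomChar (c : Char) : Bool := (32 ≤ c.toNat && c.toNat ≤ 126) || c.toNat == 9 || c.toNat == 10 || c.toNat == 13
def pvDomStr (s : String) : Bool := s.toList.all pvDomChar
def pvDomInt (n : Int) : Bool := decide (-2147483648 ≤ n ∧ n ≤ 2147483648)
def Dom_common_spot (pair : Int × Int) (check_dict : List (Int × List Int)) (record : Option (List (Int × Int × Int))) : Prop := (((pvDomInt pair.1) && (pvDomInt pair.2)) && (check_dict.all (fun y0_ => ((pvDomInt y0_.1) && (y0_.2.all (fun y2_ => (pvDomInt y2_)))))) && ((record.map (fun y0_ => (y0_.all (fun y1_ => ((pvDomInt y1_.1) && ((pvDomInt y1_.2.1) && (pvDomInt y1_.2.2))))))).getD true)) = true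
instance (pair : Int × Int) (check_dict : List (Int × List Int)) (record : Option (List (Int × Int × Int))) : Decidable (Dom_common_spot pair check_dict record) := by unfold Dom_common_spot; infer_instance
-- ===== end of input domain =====

-- B replaces the two-set build + set intersection with a sort-then-merge scan: both users' distinct
-- spot lists are sorted and walked in lockstep with two pointers, counting equal heads (alternative
-- algorithm, not claimed faster). Both Pythons mutate `record` identically when it is not None; the
-- equivalence proved here is about the RETURN value.

-- ===== PORT A =====
-- A: P_x = set(check_dict[x]); P_y = set(check_dict[y]); score = len(P_x & P_y).
-- check_dict[x]/check_dict[y] raise KeyError on a missing key: Pre_ excludes that; the `0` arms are unreachable under Pre_.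
-- `assert len(pair) == 2` always holds for a 2-tuple; the `record` write does not affect the return value.
def common_spot (pair : Int × Int) (check_dict : List (Int × List Int)) (record : Option (List (Int × Int × Int))) : Int :=
  let d := PySem.Dict.mk check_dict
  match d.get? pair.1, d.get? pair.2 with
  | some cx, some cy =>
      let P_x : PySem.Set Int := PySem.Set.ofList cx
      let P_y : PySem.Set Int := PySem.Set.ofList cy
      let P_common := PySem.Set.inter P_x P_y
      PySem.Set.len P_common
  | _, _ => 0

-- ===== PORT B =====
-- B's while loop: each iteration advances pointer i, pointer j, or both (with score += 1);
-- mergeCountB consumes the suffixes xs[i:], ys[j:] with exactly the same step at each iteration.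
def mergeCountB : List Int → List Int → Int
  | [], _ => 0
  | _ :: _, [] => 0
  | a :: as, b :: bs =>
      if a < b then mergeCountB as (b :: bs)
      else if b < a then mergeCountB (a :: as) bs
      else 1 + mergeCountB as bs

-- B: xs = sorted(set(check_dict[x])); ys = sorted(set(check_dict[y])); two-pointer merge count.
def common_spot_alt (pair : Int × Int) (check_dict : List (Int × List Int)) (record : Option (List (Int × Int × Int))) : Int :=
  let d := PySem.Dict.mk check_dict
  match d.get? pair.1 with
  | none => 0
  | some cx =>
    match d.get? pair.2 with
    | none => 0
    | some cy =>
      let xs := PySem.List.sorted (PySem.Set.ofList cx) (fun v => v) false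
      let ys := PySem.List.sorted (PySem.Set.ofList cy) (fun v => v) false
      mergeCountB xs ys

-- ===== PRECONDITION & SPEC =====
-- Pre_: both members of the pair are keys of check_dict (Python A raises KeyError otherwise).
def Pre_common_spot (pair : Int × Int) (check_dict : List (Int × List Int)) (record : Option (List (Int × Int × Int))) : Prop :=
  pair.1 ∈ check_dict.map Prod.fst ∧ pair.2 ∈ check_dict.map Prod.fst
instance (pair : Int × Int) (check_dict : List (Int × List Int)) (record : Option (List (Int × Int × Int))) : Decidable (Pre_common_spot pair check_dict record) := by unfold Pre_common_spot; infer_instance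

def pvWitness_common_spot : (Int × Int) × (List (Int × List Int)) × (Option (List (Int × Int × Int))) :=
  ((0, 1), [(0, [1, 2, 3]), (1, [2, 3, 4])], none)

def Spec_common_spot (pair : Int × Int) (check_dict : List (Int × List Int)) (record : Option (List (Int × Int × Int))) (out : Int) : Prop := out = common_spot_alt pair check_dict record
instance (pair : Int × Int) (check_dict : List (Int × List Int)) (record : Option (List (Int × Int × Int))) (out : Int) : Decidable (Spec_common_spot pair check_dict record out) := by unfold Spec_common_spot; infer_instance

-- ===== CLAIM =====
def Claim_equal_common_spot : Prop := ∀ (pair : Int × Int) (check_dict : List (Int × List Int)) (record : Option (List (Int × Int × Int))), Dom_common_spot pair check_dict record → Pre_common_spot pair check_dict record → Spec_common_spot pair check_dict record (common_spot pair check_dict record)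

-- ===== LEMMAS AND PROOFS =====

-- On strictly increasing lists, the merge scan counts exactly the members of xs that lie in ys.
theorem mergeCountB_eq_filter (xs ys : List Int)
    (hx : xs.Pairwise (· < ·)) (hy : ys.Pairwise (· < ·)) :
    mergeCountB xs ys = ((xs.filter (fun a => decide (a ∈ ys))).length : Int) := by
  induction xs generalizing ys with
  | nil => simp [mergeCountB]
  | cons a as ih =>
    induction ys with
    | nil => simp [mergeCountB]
    | cons b bs ihy =>
      rw [List.pairwise_cons] at hx hy
      by_cases hab : a < b
      · have hna : a ∉ b :: bs := by
          intro hmem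
          rcases List.mem_cons.mp hmem with h | h
          · omega
          · have := hy.1 a h; omega
        rw [mergeCountB, if_pos hab]
        simp only [List.filter_cons, decide_eq_true_eq]
        rw [ih (b :: bs) hx.2 (List.pairwise_cons.mpr hy)]
        simp [hna]
      · by_cases hba : b < a
        · have hnb : ∀ c ∈ a :: as, (c ∈ b :: bs) ↔ (c ∈ bs) := by
            intro c hc
            have hca : a ≤ c := by
              rcases List.mem_cons.mp hc with h | h
              · omega
              · have := hx.1 c h; omega
            constructor
            · intro hm
              rcases List.mem_cons.mp hm with h | h
              · omega
              · exact h
            · exact fun h => List.mem_cons_of_mem _ h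
          rw [mergeCountB, if_neg hab, if_pos hba]
          rw [ihy hy.2]
          exact congrArg (fun l : List Int => ((l.length : Int)))
            (List.filter_congr (fun c hc => by simp [hnb c hc])).symm
        · have heq : a = b := by omega
          subst heq
          have hnas : ∀ c ∈ as, (c ∈ a :: bs) ↔ (c ∈ bs) := by
            intro c hc
            have := hx.1 c hc
            constructor
            · intro hm
              rcases List.mem_cons.mp hm with h | h
              · omega
              · exact h
            · exact fun h => List.mem_cons_of_mem _ h
          rw [mergeCountB, if_neg hab, if_neg hba]
          rw [ih bs hx.2 hy.2]
          simp only [List.filter_cons, decide_eq_true_eq]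
          rw [if_pos (List.mem_cons_self)]
          have : as.filter (fun c => decide (c ∈ a :: bs)) = as.filter (fun c => decide (c ∈ bs)) := by
            apply List.filter_congr
            intro c hc
            simp [hnas c hc]
          simp only [List.length_cons, this]
          push_cast
          ring

-- The key identity: the merge count of the two sorted deduplicated lists is the intersection size.
theorem common_spot_key (cx cy : List Int) :
    mergeCountB (PySem.List.sorted (PySem.Set.ofList cx) (fun v => v) false)
                (PySem.List.sorted (PySem.Set.ofList cy) (fun v => v) false)
      = PySem.Set.len (PySem.Set.inter (PySem.Set.ofList cx) (PySem.Set.ofList cy)) := by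
  set sx := PySem.Set.ofList cx with hsx
  set sy := PySem.Set.ofList cy with hsy
  have hpx : (PySem.List.sorted (PySem.Set.ofList cx) (fun v : Int => v) false).Pairwise (· < ·) :=
    PySem.List.sorted_ofList_pairwise_lt cx
  have hpy : (PySem.List.sorted (PySem.Set.ofList cy) (fun v : Int => v) false).Pairwise (· < ·) :=
    PySem.List.sorted_ofList_pairwise_lt cy
  rw [mergeCountB_eq_filter _ _ hpx hpy]
  have hperm : (PySem.List.sorted sx (fun v => v) false).Perm sx :=
    PySem.List.sorted_perm _ _ _
  have hmem : ∀ a : Int, (a ∈ PySem.List.sorted sy (fun v => v) false) ↔ a ∈ sy := by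
    intro a; exact PySem.List.mem_sorted sy (fun v => v) false a
  have hfil : (PySem.List.sorted sx (fun v => v) false).filter
      (fun a => decide (a ∈ PySem.List.sorted sy (fun v => v) false))
      = (PySem.List.sorted sx (fun v => v) false).filter (fun a => PySem.Set.contains sy a) := by
    apply List.filter_congr
    intro a _
    simp [hmem a, PySem.Set.contains]
  rw [hfil]
  have hlen : ((PySem.List.sorted sx (fun v => v) false).filter (fun a => PySem.Set.contains sy a)).length
      = (sx.filter (fun a => PySem.Set.contains sy a)).length :=
    (hperm.filter _).length_eq
  rw [hlen]
  rfl

-- ===== VERDICT =====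
theorem common_spot_spec : Claim_equal_common_spot := by
  intro pair check_dict record _ _
  unfold Spec_common_spot common_spot common_spot_alt
  cases h1 : (PySem.Dict.mk check_dict).get? pair.1 <;>
    cases h2 : (PySem.Dict.mk check_dict).get? pair.2 <;>
    simp only [h1, h2]
  exact (common_spot_key _ _).symm
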